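-- pv_equiv track=rewrite | github.com/jsw7524/Leetcode | 152. Maximum Product Subarray/152. Maximum Product Subarray.py | trimFirstNeg
-- ===== SOURCE A (Python) =====
-- def trimFirstNeg(arr):
--     tmp=[]
--     encounter=False;
--     for a in arr:
--         if False==encounter:
--             if a < 0:
--                 encounter=True
--         else:
--             tmp.append(a)
--     return tmp if len(tmp)>0 else [0]
-- ===== SOURCE B (Python) =====
-- def trimFirstNeg(arr):
--     idx = next((i for i, a in enumerate(arr) if a < 0), None)
--     res = [] if idx is None else arr[idx + 1:]
--     return res if res else [0]
-- ===== Notes on version B (the rewrite author's own statement) =====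
-- stated objective: simpler
-- what changed: Replaces A's flag-threaded accumulation loop with locating the first negative index and taking the suffix slice after it.
import Mathlib
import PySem

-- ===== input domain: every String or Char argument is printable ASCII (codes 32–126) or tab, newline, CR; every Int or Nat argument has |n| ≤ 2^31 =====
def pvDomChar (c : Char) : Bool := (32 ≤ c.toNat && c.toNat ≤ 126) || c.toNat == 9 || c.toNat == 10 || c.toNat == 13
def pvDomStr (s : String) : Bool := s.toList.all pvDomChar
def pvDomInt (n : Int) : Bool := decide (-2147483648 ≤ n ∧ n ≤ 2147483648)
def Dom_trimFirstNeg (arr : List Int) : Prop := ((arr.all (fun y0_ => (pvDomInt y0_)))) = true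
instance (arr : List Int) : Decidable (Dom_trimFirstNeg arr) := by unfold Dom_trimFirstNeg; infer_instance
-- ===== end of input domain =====

-- B replaces A's flag-threaded accumulation loop by find-first-negative-index + suffix slice (simpler decomposition).

-- ===== PORT A =====
-- A's loop: state (tmp, encounter); append only once a negative has been seen.
def trimFirstNeg (arr : List Int) : List Int :=
  let res := arr.foldl
    (fun (s : List Int × Bool) a =>
      if s.2 = false then
        (if a < 0 then (s.1, true) else s)
      else
        (s.1 ++ [a], s.2))
    ([], false)
  if res.1.length > 0 then res.1 else [0]

-- ===== PORT B =====
-- B: index of first negative (none → []), else the suffix after it; fallback [0] if empty.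
def trimFirstNeg_alt (arr : List Int) : List Int :=
  let res := match arr.findIdx? (fun a => decide (a < 0)) with
    | none => []
    | some i => arr.drop (i + 1)
  if res.isEmpty then [0] else res

-- ===== PRECONDITION & SPEC =====
def Spec_trimFirstNeg (arr : List Int) (out : List Int) : Prop := out = trimFirstNeg_alt arr
instance (arr : List Int) (out : List Int) : Decidable (Spec_trimFirstNeg arr out) := by unfold Spec_trimFirstNeg; infer_instance

-- ===== CLAIM (what is proved, stated in full; the proofs are below) =====
def Claim_equal_trimFirstNeg : Prop := ∀ (arr : List Int), Dom_trimFirstNeg arr → Spec_trimFirstNeg arr (trimFirstNeg arr)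

-- ===== LEMMAS AND PROOFS =====

-- Once the flag is true, A's loop just appends the rest of the list.
theorem trimFirstNeg_loop_true (arr acc : List Int) :
    arr.foldl
      (fun (s : List Int × Bool) a =>
        if s.2 = false then
          (if a < 0 then (s.1, true) else s)
        else
          (s.1 ++ [a], s.2))
      (acc, true) = (acc ++ arr, true) := by
  induction arr generalizing acc with
  | nil => simp
  | cons a t ih => simp [List.foldl, ih (acc ++ [a])]

-- A's loop result equals B's suffix computation.
theorem trimFirstNeg_loop_eq (arr : List Int) :
    (arr.foldl
      (fun (s : List Int × Bool) a =>
        if s.2 = false then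
          (if a < 0 then (s.1, true) else s)
        else
          (s.1 ++ [a], s.2))
      ([], false)).1 =
      (match arr.findIdx? (fun a => decide (a < 0)) with
        | none => ([] : List Int)
        | some i => arr.drop (i + 1)) := by
  induction arr with
  | nil => simp
  | cons a t ih =>
    by_cases h : a < 0
    · simp [List.foldl, h, trimFirstNeg_loop_true, List.findIdx?_cons]
    · simp only [List.foldl, if_neg h, reduceIte]
      rw [ih]
      simp only [List.findIdx?_cons, decide_eq_true_eq, if_neg h]
      cases hf : t.findIdx? (fun a => decide (a < 0)) with
      | none => simp
      | some i => simp [List.drop_succ_cons]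

-- ===== VERDICT (by name: the statement is the Claim_ definition above) =====
theorem trimFirstNeg_spec : Claim_equal_trimFirstNeg := by
  intro arr _
  unfold Spec_trimFirstNeg
  simp only [trimFirstNeg, trimFirstNeg_alt]
  rw [trimFirstNeg_loop_eq]
  cases hf : arr.findIdx? (fun a => decide (a < 0)) with
  | none => simp
  | some i =>
    simp only
    rcases h : arr.drop (i + 1) with _ | ⟨x, xs⟩ <;> simp
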